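-- pv_equiv track=rewrite | github.com/isidentical-archive/Arkhe | arkhe/utils.py | divide_sequence
-- ===== SOURCE A (Python) =====
-- from copy import copy
-- from typing import List, Sequence
--
-- def divide_sequence(sequence: Sequence[int], terminator: int = 0) -> List[List[int]]:
--     result, tmp = [], []
--     for item in sequence:
--         if item != terminator:
--             tmp.append(item)
--
--         else:
--             result.append(copy(tmp))
--             tmp.clear()
--
--     return result
-- ===== SOURCE B (Python) =====
-- def divide_sequence(sequence, terminator=0):
--     result = []
--     rest = list(sequence)
--     while terminator in rest:
--         i = rest.index(terminator)
--         result.append(rest[:i])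
--         rest = rest[i + 1:]
--     return result
-- ===== Notes on version B (the rewrite author's own statement) =====
-- stated objective: alternative
-- what changed: Replaced the single-pass accumulator loop (tmp list cleared at each terminator) by a repeated find-and-split: while the terminator occurs, locate its first index, append the slice before it, and continue on the slice after it.
import Mathlib
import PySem

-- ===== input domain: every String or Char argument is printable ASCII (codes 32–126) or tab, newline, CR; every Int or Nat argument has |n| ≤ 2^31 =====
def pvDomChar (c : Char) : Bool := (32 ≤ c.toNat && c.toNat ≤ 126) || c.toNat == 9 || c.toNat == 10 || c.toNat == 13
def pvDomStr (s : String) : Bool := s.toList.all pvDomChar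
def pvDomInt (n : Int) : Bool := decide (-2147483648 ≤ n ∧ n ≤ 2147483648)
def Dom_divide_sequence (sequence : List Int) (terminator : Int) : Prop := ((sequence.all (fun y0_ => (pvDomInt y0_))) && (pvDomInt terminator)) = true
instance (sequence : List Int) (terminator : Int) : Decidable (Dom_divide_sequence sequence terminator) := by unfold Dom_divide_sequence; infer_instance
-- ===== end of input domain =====

-- B replaces A's single-pass accumulator loop by repeated find-first-terminator-and-split (alternative decomposition; not claimed faster).

-- ===== PORT A =====
-- for item in sequence: if item != terminator: tmp.append(item) else: result.append(copy(tmp)); tmp.clear()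
def divide_sequence (sequence : List Int) (terminator : Int) : List (List Int) :=
  (sequence.foldl
    (fun (st : List (List Int) × List Int) item =>
      if item ≠ terminator then (st.1, st.2 ++ [item])
      else (st.1 ++ [st.2], ([] : List Int)))
    (([] : List (List Int)), ([] : List Int))).1

-- ===== PORT B =====
-- while terminator in rest: i = rest.index(terminator); result.append(rest[:i]); rest = rest[i+1:]
-- (under the membership guard rest.index cannot raise, so index? is some; getD 0 is never the default)
def divide_sequence_alt_go (rest : List Int) (terminator : Int) : List (List Int) :=
  if h : terminator ∈ rest then
    let i : Nat := (PySem.List.index? rest terminator).getD 0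
    PySem.List.slice rest none (some (i : Int)) ::
      divide_sequence_alt_go (PySem.List.slice rest (some ((i : Int) + 1)) none) terminator
  else []
termination_by rest.length
decreasing_by
  have hc : ((i : Int) + 1) = (((i + 1 : Nat)) : Int) := by push_cast; ring
  rw [hc, PySem.List.slice_from_natCast]
  have : 0 < rest.length := List.length_pos_of_mem h
  simp only [List.length_drop]; omega

def divide_sequence_alt (sequence : List Int) (terminator : Int) : List (List Int) :=
  divide_sequence_alt_go sequence terminator

-- ===== PRECONDITION & SPEC =====
def Spec_divide_sequence (sequence : List Int) (terminator : Int) (out : List (List Int)) : Prop := out = divide_sequence_alt sequence terminator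
instance (sequence : List Int) (terminator : Int) (out : List (List Int)) : Decidable (Spec_divide_sequence sequence terminator out) := by unfold Spec_divide_sequence; infer_instance

-- ===== CLAIM (what is proved, stated in full; the proofs are below) =====
def Claim_equal_divide_sequence : Prop := ∀ (sequence : List Int) (terminator : Int), Dom_divide_sequence sequence terminator → Spec_divide_sequence sequence terminator (divide_sequence sequence terminator)

-- ===== LEMMAS AND PROOFS =====

-- prepend tmp onto the first group, if any
def pvPrep (tmp : List Int) : List (List Int) → List (List Int)
  | [] => []
  | g :: gs => (tmp ++ g) :: gs

theorem pvPrep_nil (gs : List (List Int)) : pvPrep [] gs = gs := by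
  cases gs <;> simp [pvPrep]

theorem pvPrep_prep (a b : List Int) (gs : List (List Int)) :
    pvPrep a (pvPrep b gs) = pvPrep (a ++ b) gs := by
  cases gs <;> simp [pvPrep]

theorem alt_go_neg (s : List Int) (t : Int) (h : t ∉ s) :
    divide_sequence_alt_go s t = [] := by
  rw [divide_sequence_alt_go]; simp [h]

theorem alt_go_pos (s : List Int) (t : Int) (i : Nat)
    (h : PySem.List.index? s t = some i) :
    divide_sequence_alt_go s t = s.take i :: divide_sequence_alt_go (s.drop (i + 1)) t := by
  have hm : t ∈ s := (PySem.List.index?_isSome_iff s t).mp (by rw [h]; rfl)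
  rw [divide_sequence_alt_go]
  simp only [hm, dif_pos, h, Option.getD_some]
  have hc : ((i : Int) + 1) = (((i + 1 : Nat)) : Int) := by push_cast; ring
  rw [hc, PySem.List.slice_from_natCast, PySem.List.slice_to_natCast]

-- B on a cons with a non-terminator head prepends the head to the first group
theorem alt_go_cons_ne (x t : Int) (xs : List Int) (hx : x ≠ t) :
    divide_sequence_alt_go (x :: xs) t = pvPrep [x] (divide_sequence_alt_go xs t) := by
  by_cases hm : t ∈ xs
  · obtain ⟨i, hi⟩ := Option.isSome_iff_exists.mp ((PySem.List.index?_isSome_iff xs t).mpr hm)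
    have hix : PySem.List.index? (x :: xs) t = some (i + 1) := by
      rw [PySem.List.index?_cons_of_ne xs hx, hi]; rfl
    rw [alt_go_pos _ _ _ hix, alt_go_pos _ _ _ hi]
    simp [pvPrep, List.take_succ_cons, List.drop_succ_cons]
  · have hnx : t ∉ x :: xs := by
      intro hc
      rcases List.mem_cons.mp hc with h1 | h2
      · exact hx h1.symm
      · exact hm h2
    rw [alt_go_neg _ _ hnx, alt_go_neg _ _ hm]; rfl

-- A's fold with any starting accumulator, in terms of B
theorem foldA_eq (t : Int) (s : List Int) :
    ∀ (res : List (List Int)) (tmp : List Int),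
      (s.foldl
        (fun (st : List (List Int) × List Int) item =>
          if item ≠ t then (st.1, st.2 ++ [item])
          else (st.1 ++ [st.2], ([] : List Int)))
        (res, tmp)).1 = res ++ pvPrep tmp (divide_sequence_alt_go s t) := by
  induction s with
  | nil =>
    intro res tmp
    rw [List.foldl_nil, alt_go_neg [] t (by simp), pvPrep]
    simp
  | cons x xs ih =>
    intro res tmp
    by_cases hx : x = t
    · subst hx
      have hix : PySem.List.index? (x :: xs) x = some 0 := PySem.List.index?_cons_self _ _
      rw [alt_go_pos _ _ _ hix, List.foldl_cons, if_neg (by simp), ih, pvPrep_nil]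
      simp [pvPrep]
    · simp only [List.foldl_cons, if_pos hx]
      rw [ih, alt_go_cons_ne x t xs hx, pvPrep_prep]

-- ===== VERDICT (by name: the statement is the Claim_ definition above) =====
theorem divide_sequence_spec : Claim_equal_divide_sequence := by
  intro sequence terminator _
  unfold Spec_divide_sequence divide_sequence divide_sequence_alt
  rw [foldA_eq terminator sequence [] []]
  simp [pvPrep_nil]
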